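-- pv_equiv track=rewrite | github.com/jsinghw/backend-nested-brackets | nested.py | valid_angle_brace
-- ===== SOURCE A (Python) =====
-- def valid_angle_brace(string):
--     cnt = 0
--     pos = 0
--     for char in string:
--         if char == '<':
--             cnt += 1
--         if char == '>':
--             cnt -= 1
--         if cnt < 0:
--             return('NO ' + str(pos))
--         pos += 1
--     if cnt == 0:
--         return('YES')
--     else:
--         return('NO ' + str(pos))
-- ===== SOURCE B (Python) =====
-- def valid_angle_brace(string):
--     incs = [(c == '<') - (c == '>') for c in string]
--     bal = []
--     total = 0
--     for d in incs:
--         total += d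
--         bal.append(total)
--     for i, b in enumerate(bal):
--         if b < 0:
--             return 'NO ' + str(i)
--     return 'YES' if total == 0 else 'NO ' + str(len(string))
-- ===== Notes on version B (the rewrite author's own statement) =====
-- stated objective: alternative
-- what changed: Replaces A's single stateful early-return loop by a three-stage pipeline: map characters to +1/-1/0 increments, build the full prefix-sum (running balance) list, then scan it for the first negative balance.
import Mathlib
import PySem

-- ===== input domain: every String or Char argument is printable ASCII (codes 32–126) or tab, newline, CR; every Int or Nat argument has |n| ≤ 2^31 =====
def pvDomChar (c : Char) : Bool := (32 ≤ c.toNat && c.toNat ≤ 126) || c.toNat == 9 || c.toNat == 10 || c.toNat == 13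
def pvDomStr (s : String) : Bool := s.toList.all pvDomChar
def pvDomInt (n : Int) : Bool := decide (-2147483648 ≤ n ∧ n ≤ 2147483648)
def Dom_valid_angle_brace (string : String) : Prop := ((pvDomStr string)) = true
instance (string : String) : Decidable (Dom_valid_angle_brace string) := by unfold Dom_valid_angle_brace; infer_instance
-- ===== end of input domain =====

-- B replaces A's single stateful early-return loop by a map-to-increments / prefix-sum / scan pipeline (objective: alternative decomposition, same cost).

-- ===== PORT A =====
-- A's loop: recursion over the characters with state (cnt, pos), early return on cnt < 0.
def vabLoopA : List Char → Int → Int → String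
  | [], cnt, pos => if cnt = 0 then "YES" else "NO " ++ PySem.Int.toStr pos
  | c :: rest, cnt, pos =>
      let cnt1 := if c = '<' then cnt + 1 else cnt
      let cnt2 := if c = '>' then cnt1 - 1 else cnt1
      if cnt2 < 0 then "NO " ++ PySem.Int.toStr pos
      else vabLoopA rest cnt2 (pos + 1)

def valid_angle_brace (string : String) : String := vabLoopA string.toList 0 0

-- ===== PORT B =====
-- (c == '<') - (c == '>')
def vabInc (c : Char) : Int := (if c = '<' then 1 else 0) - (if c = '>' then 1 else 0)

-- the enumerate-scan for the first negative balance, early return with its index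
def vabFindNeg : List Int → Nat → Option Nat
  | [], _ => none
  | b :: rest, i => if b < 0 then some i else vabFindNeg rest (i + 1)

def valid_angle_brace_alt (string : String) : String :=
  let incs := string.toList.map vabInc
  let bt := incs.foldl (fun (p : List Int × Int) d => (p.1 ++ [p.2 + d], p.2 + d)) ([], 0)
  match vabFindNeg bt.1 0 with
  | some i => "NO " ++ PySem.Int.toStr (Int.ofNat i)
  | none => if bt.2 = 0 then "YES" else "NO " ++ PySem.Int.toStr (Int.ofNat string.toList.length)

-- ===== PRECONDITION & SPEC =====
def Spec_valid_angle_brace (string : String) (out : String) : Prop := out = valid_angle_brace_alt string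
instance (string : String) (out : String) : Decidable (Spec_valid_angle_brace string out) := by unfold Spec_valid_angle_brace; infer_instance

-- ===== CLAIM (what is proved, stated in full; the proofs are below) =====
def Claim_equal_valid_angle_brace : Prop := ∀ (string : String), Dom_valid_angle_brace string → Spec_valid_angle_brace string (valid_angle_brace string)

-- ===== LEMMAS AND PROOFS =====

-- prefix sums of ds starting from running total t
def vabSums (t : Int) : List Int → List Int
  | [] => []
  | d :: r => (t + d) :: vabSums (t + d) r

lemma vabFold_eq (ds : List Int) : ∀ (acc : List Int) (t : Int),
    ds.foldl (fun (p : List Int × Int) d => (p.1 ++ [p.2 + d], p.2 + d)) (acc, t)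
      = (acc ++ vabSums t ds, t + ds.sum) := by
  induction ds with
  | nil => intro acc t; simp [vabSums]
  | cons d r ih =>
      intro acc t
      simp only [List.foldl, vabSums, List.sum_cons]
      rw [ih]
      simp
      ring

lemma vabFindNeg_shift (l : List Int) : ∀ k : Nat, vabFindNeg l k = (vabFindNeg l 0).map (· + k) := by
  induction l with
  | nil => intro k; simp [vabFindNeg]
  | cons b r ih =>
      intro k
      by_cases h : b < 0
      · simp [vabFindNeg, h]
      · simp only [vabFindNeg, if_neg h]
        rw [ih (k + 1), ih 1]
        cases vabFindNeg r 0 <;> simp <;> omega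

lemma vab_main (cs : List Char) : ∀ (cnt pos : Int), 0 ≤ cnt →
    vabLoopA cs cnt pos =
      (match vabFindNeg (vabSums cnt (cs.map vabInc)) 0 with
        | some i => "NO " ++ PySem.Int.toStr (pos + (i : Int))
        | none => if cnt + (cs.map vabInc).sum = 0 then "YES"
                  else "NO " ++ PySem.Int.toStr (pos + (cs.length : Int))) := by
  induction cs with
  | nil =>
      intro cnt pos _
      simp [vabLoopA, vabSums, vabFindNeg]
  | cons c r ih =>
      intro cnt pos hcnt
      have hinc : (if c = '>' then (if c = '<' then cnt + 1 else cnt) - 1 else (if c = '<' then cnt + 1 else cnt)) = cnt + vabInc c := by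
        unfold vabInc
        by_cases h1 : c = '<' <;> by_cases h2 : c = '>' <;> simp [h1, h2] at * <;> omega
      simp only [vabLoopA, List.map_cons, vabSums, List.sum_cons]
      rw [hinc]
      by_cases hneg : cnt + vabInc c < 0
      · simp [vabFindNeg, hneg]
      · rw [if_neg hneg]
        rw [ih (cnt + vabInc c) (pos + 1) (by omega)]
        simp only [vabFindNeg, if_neg hneg]
        rw [vabFindNeg_shift _ 1]
        cases hfn : vabFindNeg (vabSums (cnt + vabInc c) (r.map vabInc)) 0 with
        | none =>
            simp only [Option.map_none]
            have : cnt + vabInc c + (r.map vabInc).sum = cnt + (vabInc c + (r.map vabInc).sum) := by ring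
            rw [this]
            split_ifs with h
            · rfl
            · have hlen : pos + 1 + (r.length : Int) = pos + ((c :: r).length : Int) := by
                simp only [List.length_cons]; push_cast; ring
              rw [hlen]
        | some i =>
            simp only [Option.map_some]
            have hi : pos + 1 + (i : Int) = pos + ((i + 1 : Nat) : Int) := by push_cast; ring
            rw [hi]

-- ===== VERDICT (by name: the statement is the Claim_ definition above) =====
theorem valid_angle_brace_spec : Claim_equal_valid_angle_brace := by
  intro s _
  unfold Spec_valid_angle_brace valid_angle_brace valid_angle_brace_alt
  simp only [vabFold_eq, List.nil_append, zero_add]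
  rw [vab_main s.toList 0 0 le_rfl]
  cases vabFindNeg (vabSums 0 (s.toList.map vabInc)) 0 <;> simp
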